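-- pv_equiv track=rewrite | github.com/BLannoo/Advent-of-Code-2018 | solutions/day20/day20.py | create_base_grid
-- ===== SOURCE A (Python) =====
-- from typing import List, Set
--
-- def create_base_grid(radius: int) -> List[List[str]]:
--     number_of_rooms_side_by_side = radius * 2 + 1
--     grid = [
--         ["#" for _ in range(number_of_rooms_side_by_side * 2 + 1)]
--         for _ in range(number_of_rooms_side_by_side * 2 + 1)
--     ]
--     for x in range(number_of_rooms_side_by_side):
--         for y in range(number_of_rooms_side_by_side):
--             grid[y * 2 + 1][x * 2 + 1] = "."
--     return grid
-- ===== SOURCE B (Python) =====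
-- def create_base_grid(radius: int):
--     side = radius * 2 + 1
--     size = 2 * side + 1
--     wall = "#" * size
--     room = "#." * side + "#"
--     return [list(room if i % 2 else wall) for i in range(size)]
-- ===== Notes on version B (the rewrite author's own statement) =====
-- stated objective: alternative
-- what changed: Instead of allocating an all-'#' grid and patching each room cell with a second nested loop, B builds two prototype row strings once by string repetition (a solid wall row and an alternating '#.'-room row) and assembles the grid by alternating copies of these two rows.
import Mathlib
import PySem

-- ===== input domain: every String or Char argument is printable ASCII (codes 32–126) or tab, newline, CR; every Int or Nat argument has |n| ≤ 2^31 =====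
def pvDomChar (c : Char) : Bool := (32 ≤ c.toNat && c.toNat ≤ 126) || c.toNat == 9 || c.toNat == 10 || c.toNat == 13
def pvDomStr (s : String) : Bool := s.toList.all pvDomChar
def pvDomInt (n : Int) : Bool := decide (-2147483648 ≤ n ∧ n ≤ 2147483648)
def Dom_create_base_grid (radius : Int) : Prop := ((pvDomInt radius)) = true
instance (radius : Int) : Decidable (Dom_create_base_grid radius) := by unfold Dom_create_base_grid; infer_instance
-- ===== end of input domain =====

-- B replaces A's allocate-then-patch grid construction by building two prototype rows once
-- (wall row, alternating room row) and assembling the grid from alternating copies; objective: alternative.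

-- ===== PORT A =====
def create_base_grid (radius : Int) : List (List String) :=
  let number_of_rooms_side_by_side : Int := radius * 2 + 1
  let grid : List (List String) :=
    (PySem.List.pyRange 0 (number_of_rooms_side_by_side * 2 + 1) 1).map (fun _ =>
      (PySem.List.pyRange 0 (number_of_rooms_side_by_side * 2 + 1) 1).map (fun _ => "#"))
  (PySem.List.pyRange 0 number_of_rooms_side_by_side 1).foldl (fun grid x =>
    (PySem.List.pyRange 0 number_of_rooms_side_by_side 1).foldl (fun grid y =>
      grid.modify (y * 2 + 1).toNat (fun row => row.set (x * 2 + 1).toNat ".")) grid) grid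

-- ===== PORT B =====
-- Python's string repetition '"#" * size' / '"#." * side' followed by list(...) is ported as the
-- list of one-character strings it yields: List.replicate (negative counts give the empty string,
-- hence []; toNat clamps exactly like Python's * on negative ints). Exact on all ints.
def create_base_grid_alt (radius : Int) : List (List String) :=
  let side : Int := radius * 2 + 1
  let size : Int := 2 * side + 1
  let wall : List String := List.replicate size.toNat "#"
  let room : List String := (List.replicate side.toNat ["#", "."]).flatten ++ ["#"]
  (PySem.List.pyRange 0 size 1).map (fun i =>
    if PySem.Int.mod i 2 ≠ 0 then room else wall)

-- ===== PRECONDITION & SPEC =====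
def Spec_create_base_grid (radius : Int) (out : List (List String)) : Prop := out = create_base_grid_alt radius
instance (radius : Int) (out : List (List String)) : Decidable (Spec_create_base_grid radius out) := by unfold Spec_create_base_grid; infer_instance

-- ===== CLAIM (what is proved, stated in full; the proofs are below) =====
def Claim_equal_create_base_grid : Prop := ∀ (radius : Int), Dom_create_base_grid radius → Spec_create_base_grid radius (create_base_grid radius)

-- ===== LEMMAS AND PROOFS =====

-- Nat-indexed shapes of A's computation (proof helpers only).
def pvGrid0 (sz : Nat) : List (List String) :=
  (List.range sz).map (fun _ => (List.range sz).map (fun _ => "#"))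

def pvRow (sz m i : Nat) : List String :=
  (List.range sz).map (fun j => if i % 2 = 1 ∧ j % 2 = 1 ∧ j < 2 * m then "." else "#")

def pvInner (k c : Nat) (g : List (List String)) : List (List String) :=
  (List.range k).foldl (fun g y => g.modify (y * 2 + 1) (fun row => row.set c ".")) g

def pvOuter (s m : Nat) (g : List (List String)) : List (List String) :=
  (List.range m).foldl (fun g x => pvInner s (x * 2 + 1) g) g

-- Nat-indexed shapes of B's two prototype rows (proof helpers only).
def pvWall (s : Nat) : List String := List.replicate (2 * s + 1) "#"
def pvRoom (s : Nat) : List String := (List.replicate s ["#", "."]).flatten ++ ["#"]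

lemma pvInner_getElem? (k c : Nat) (g : List (List String)) (i : Nat) :
    (pvInner k c g)[i]? =
      if i % 2 = 1 ∧ i < 2 * k then g[i]?.map (fun r => r.set c ".") else g[i]? := by
  induction k with
  | zero => simp [pvInner]
  | succ k ih =>
    have hstep : pvInner (k+1) c g
        = (pvInner k c g).modify (k * 2 + 1) (fun row => row.set c ".") := by
      simp [pvInner, List.range_succ]
    rw [hstep, List.getElem?_modify, ih]
    by_cases h : k * 2 + 1 = i
    · subst h
      have h2 : ¬ (k * 2 + 1 < 2 * k) := by omega
      simp only [h2, and_false, if_false, Option.map_eq_map]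
      cases g[k * 2 + 1]? with
      | none => simp
      | some r =>
        simp only [Option.map_some, if_true]
        rw [if_pos ⟨by omega, by omega⟩]
    · have hid : (fun a => if k * 2 + 1 = i then a.set c "." else a)
          <$> (if i % 2 = 1 ∧ i < 2 * k then g[i]?.map (fun r => r.set c ".") else g[i]?)
          = (if i % 2 = 1 ∧ i < 2 * k then g[i]?.map (fun r => r.set c ".") else g[i]?) := by
        split_ifs <;> cases g[i]? <;> simp
      rw [hid]
      split_ifs with h1 h2 h2 <;> first | rfl | (exfalso; omega)

lemma pvRow_set (sz m i : Nat) (hi : i % 2 = 1) (hc : m * 2 + 1 < sz) :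
    (pvRow sz m i).set (m * 2 + 1) "." = pvRow sz (m + 1) i := by
  apply List.ext_getElem?
  intro j
  simp only [pvRow, List.getElem?_set, List.getElem?_map, List.length_map, List.length_range]
  by_cases hj : m * 2 + 1 = j
  · subst hj
    rw [if_pos rfl, if_pos hc, List.getElem?_range hc]
    simp only [Option.map_some, Option.some.injEq]
    rw [if_pos ⟨hi, by omega, by omega⟩]
  · rw [if_neg hj]
    by_cases hlt : j < sz
    · rw [List.getElem?_range hlt]
      simp only [Option.map_some, Option.some.injEq]
      split_ifs with h1 h2 h2 <;> first | rfl | (exfalso; omega)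
    · have hnone : (List.range sz)[j]? = none := by
        simp only [List.getElem?_eq_none_iff, List.length_range]; omega
      rw [hnone]
      rfl

lemma pvRow_zero (sz i : Nat) :
    pvRow sz 0 i = (List.range sz).map (fun _ => "#") := by
  simp [pvRow]

lemma pvOuter_getElem? (s m : Nat) (hm : m ≤ s) (i : Nat) :
    (pvOuter s m (pvGrid0 (2 * s + 1)))[i]? =
      if i < 2 * s + 1 then some (pvRow (2 * s + 1) m i) else none := by
  induction m with
  | zero =>
    simp only [pvOuter, List.range_zero, List.foldl_nil, pvGrid0, List.getElem?_map]
    by_cases h : i < 2 * s + 1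
    · rw [List.getElem?_range h, if_pos h]
      simp [pvRow_zero]
    · have hnone : (List.range (2 * s + 1))[i]? = none := by
        simp only [List.getElem?_eq_none_iff, List.length_range]; omega
      rw [hnone, if_neg h]
      rfl
  | succ m ih =>
    have hm' : m ≤ s := by omega
    have hstep : pvOuter s (m+1) (pvGrid0 (2 * s + 1))
        = pvInner s (m * 2 + 1) (pvOuter s m (pvGrid0 (2 * s + 1))) := by
      simp [pvOuter, List.range_succ]
    rw [hstep, pvInner_getElem?, ih hm']
    by_cases hodd : i % 2 = 1
    · by_cases hlt : i < 2 * s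
      · have h1 : i < 2 * s + 1 := by omega
        simp only [hodd, hlt, and_self, if_true, h1, Option.map_some]
        rw [pvRow_set _ _ _ hodd (by omega)]
      · have h1 : ¬ i < 2 * s + 1 := by omega
        simp [hlt, h1]
    · have hno : ¬ (i % 2 = 1 ∧ i < 2 * s) := by tauto
      rw [if_neg hno]
      split_ifs with h1
      · congr 1
        simp [pvRow, hodd]
      · rfl

lemma pyRange_zero_nonpos (b : Int) (hb : b ≤ 0) : PySem.List.pyRange 0 b 1 = [] := by
  unfold PySem.List.pyRange
  have h1 : ¬ ((0:Int) < b) := by omega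
  simp [h1]

lemma create_base_grid_nat (n : Nat) :
    create_base_grid (n : Int)
      = pvOuter (2 * n + 1) (2 * n + 1) (pvGrid0 (2 * (2 * n + 1) + 1)) := by
  have hside : ((n : Int) * 2 + 1) = ((2 * n + 1 : Nat) : Int) := by push_cast; ring
  have hsize : (((2 * n + 1 : Nat) : Int)) * 2 + 1 = ((2 * (2 * n + 1) + 1 : Nat) : Int) := by
    push_cast; ring
  simp only [create_base_grid, hside, hsize, PySem.List.pyRange_zero_natCast]
  simp only [List.foldl_map, List.map_map]
  have htn : ∀ y : Nat, ((y : Int) * 2 + 1).toNat = y * 2 + 1 := by intro y; omega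
  simp only [htn]
  rfl

-- B's room row is exactly A's patched odd row.
lemma pvRoom_eq (s : Nat) :
    pvRoom s = (List.range (2 * s + 1)).map
      (fun j => if j % 2 = 1 ∧ j < 2 * s then "." else "#") := by
  induction s with
  | zero => simp [pvRoom]
  | succ s ih =>
    have h1 : 2 * (s + 1) + 1 = (2 * s + 1) + 2 := by omega
    rw [h1]
    have h2 : List.range ((2 * s + 1) + 2)
        = List.range (2 * s + 1) ++ [2 * s + 1, 2 * s + 2] := by
      rw [List.range_succ, List.range_succ]
      simp
    rw [h2, List.map_append]
    have h3 : (List.range (2 * s + 1)).map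
        (fun j => if j % 2 = 1 ∧ j < 2 * (s + 1) then "." else "#")
        = (List.range (2 * s + 1)).map
        (fun j => if j % 2 = 1 ∧ j < 2 * s then "." else "#") := by
      apply List.map_congr_left
      intro j hj
      simp only [List.mem_range] at hj
      split_ifs with ha hb hb <;> first | rfl | (exfalso; omega)
    rw [h3, ← ih]
    have h4 : ([2 * s + 1, 2 * s + 2]).map
        (fun j => if j % 2 = 1 ∧ j < 2 * (s + 1) then "." else "#") = [".", "#"] := by
      simp only [List.map_cons, List.map_nil]
      rw [if_pos ⟨by omega, by omega⟩, if_neg (by omega)]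
    rw [h4]
    simp [pvRoom, List.replicate_succ']

lemma create_base_grid_alt_nat (n : Nat) :
    create_base_grid_alt (n : Int)
      = (List.range (2 * (2 * n + 1) + 1)).map (fun i =>
          if i % 2 = 1 then pvRoom (2 * n + 1) else pvWall (2 * n + 1)) := by
  have hside : ((n : Int) * 2 + 1) = ((2 * n + 1 : Nat) : Int) := by push_cast; ring
  have hsize : (2 * ((2 * n + 1 : Nat) : Int) + 1) = ((2 * (2 * n + 1) + 1 : Nat) : Int) := by
    push_cast; ring
  simp only [create_base_grid_alt, hside, hsize, PySem.List.pyRange_zero_natCast,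
    Int.toNat_natCast, List.map_map]
  apply List.map_congr_left
  intro i _
  have hmi : PySem.Int.mod (i : Int) 2 = ((i % 2 : Nat) : Int) := by
    exact_mod_cast PySem.Int.mod_natCast i 2
  simp only [Function.comp, hmi, pvWall, pvRoom]
  have : ((i % 2 : Nat) : Int) ≠ 0 ↔ i % 2 = 1 := by omega
  rw [if_congr this rfl rfl]

lemma equal_on_nat (n : Nat) : create_base_grid (n : Int) = create_base_grid_alt (n : Int) := by
  rw [create_base_grid_nat, create_base_grid_alt_nat]
  apply List.ext_getElem?
  intro i
  rw [pvOuter_getElem? (2 * n + 1) (2 * n + 1) (le_refl _) i]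
  simp only [List.getElem?_map]
  by_cases h1 : i < 2 * (2 * n + 1) + 1
  · rw [List.getElem?_range h1, if_pos h1]
    simp only [Option.map_some, Option.some.injEq]
    by_cases hodd : i % 2 = 1
    · rw [if_pos hodd, pvRoom_eq, pvRow]
      apply List.map_congr_left
      intro j hj
      simp only [List.mem_range] at hj
      split_ifs with ha hb hb <;> first | rfl | (exfalso; omega)
    · rw [if_neg hodd, pvWall, pvRow]
      apply List.ext_getElem?
      intro j
      by_cases hlt : j < 2 * (2 * n + 1) + 1
      · rw [List.getElem?_map, List.getElem?_range hlt, List.getElem?_replicate]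
        rw [if_pos hlt]
        simp only [Option.map_some, Option.some.injEq]
        rw [if_neg (by tauto)]
      · rw [List.getElem?_map]
        have hnone : (List.range (2 * (2 * n + 1) + 1))[j]? = none := by
          simp only [List.getElem?_eq_none_iff, List.length_range]; omega
        have hnone2 : (List.replicate (2 * (2 * n + 1) + 1) ("#":String))[j]? = none := by
          simp only [List.getElem?_eq_none_iff, List.length_replicate]; omega
        rw [hnone, hnone2]
        rfl
  · have hnone : (List.range (2 * (2 * n + 1) + 1))[i]? = none := by
      simp only [List.getElem?_eq_none_iff, List.length_range]; omega
    rw [hnone, if_neg h1]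
    rfl

lemma equal_on_neg (radius : Int) (h : radius < 0) :
    create_base_grid radius = create_base_grid_alt radius := by
  have h1 : radius * 2 + 1 ≤ 0 := by omega
  have h2 : (radius * 2 + 1) * 2 + 1 ≤ 0 := by omega
  have h3 : 2 * (radius * 2 + 1) + 1 ≤ 0 := by omega
  simp only [create_base_grid, create_base_grid_alt,
    pyRange_zero_nonpos _ h1, pyRange_zero_nonpos _ h2, pyRange_zero_nonpos _ h3]
  simp

-- ===== VERDICT (by name: the statement is the Claim_ definition above) =====
theorem create_base_grid_spec : Claim_equal_create_base_grid := by
  intro radius _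
  unfold Spec_create_base_grid
  by_cases h : 0 ≤ radius
  · obtain ⟨n, rfl⟩ := Int.eq_ofNat_of_zero_le h
    exact equal_on_nat n
  · exact equal_on_neg radius (by omega)
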